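-- pv_equiv track=rewrite | github.com/liuyunan20/datastructure | main_problem/multi_pointer/stream/325_maximum_size_subarray_sum_equals_k.py | maxSubArrayLen_tle
-- ===== SOURCE A (Python) =====
-- from typing import List
--
-- def maxSubArrayLen_tle(nums: List[int], k: int) -> int:
--     n = len(nums)
--     length = 0
--     i = 0
--     while i < n:
--         sub_sum = 0
--         j = i
--         while j < n:
--             sub_sum += nums[j]
--             if sub_sum == k:
--                 length = max(length, j - i + 1)
--             j += 1
--         i += 1
--     return length
-- ===== SOURCE B (Python) =====
-- from typing import List
--
-- def maxSubArrayLen_tle(nums: List[int], k: int) -> int: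
--     # prefix-sum + hashmap of first occurrence: O(n) instead of A's O(n^2)
--     first = {0: 0}
--     best = 0
--     s = 0
--     for i, x in enumerate(nums):
--         s += x
--         if s - k in first:
--             best = max(best, i + 1 - first[s - k])
--         if s not in first:
--             first[s] = i + 1
--     return best
-- ===== Notes on version B (the rewrite author's own statement) =====
-- stated objective: faster
-- what changed: Replaced A's nested loop over all O(n^2) subarray (start,end) pairs with a single pass keeping a running prefix sum and a hashmap from each prefix-sum value to its first index, so the best subarray ending at each position is found in O(1).
import Mathlib
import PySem

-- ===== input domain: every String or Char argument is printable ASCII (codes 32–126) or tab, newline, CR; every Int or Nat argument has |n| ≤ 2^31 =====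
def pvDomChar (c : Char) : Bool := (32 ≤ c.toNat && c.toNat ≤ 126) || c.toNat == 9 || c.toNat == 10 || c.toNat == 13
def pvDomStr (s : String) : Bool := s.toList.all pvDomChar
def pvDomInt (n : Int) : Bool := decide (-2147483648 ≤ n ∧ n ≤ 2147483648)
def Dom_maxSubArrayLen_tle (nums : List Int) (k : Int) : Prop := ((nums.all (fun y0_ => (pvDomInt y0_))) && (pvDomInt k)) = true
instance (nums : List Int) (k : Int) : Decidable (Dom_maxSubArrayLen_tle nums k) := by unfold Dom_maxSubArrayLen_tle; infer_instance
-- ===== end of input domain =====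

-- B replaces A's quadratic nested scan over all subarrays by a single pass with prefix sums
-- and a hashmap storing the first index of each prefix sum (objective: faster, O(n) vs O(n^2)).

-- ===== PORT A =====
-- literal port of A: outer while over starts i, inner while over ends j carrying (sub_sum, length);
-- nums[j] with j always in [0, n) is nums.getD j 0.
def maxSubArrayLen_tle (nums : List Int) (k : Int) : Int :=
  (List.range nums.length).foldl
    (fun length i =>
      ((List.range' i (nums.length - i)).foldl
        (fun (st : Int × Int) j =>
          (st.1 + nums.getD j 0,
           if st.1 + nums.getD j 0 = k then max st.2 ((j : Int) - (i : Int) + 1) else st.2))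
        ((0 : Int), length)).2)
    0

-- ===== PORT B =====
-- literal port of B: fold over enumerate(nums) carrying (s, best, first), first = {0: 0} initially.
def maxSubArrayLen_tle_alt (nums : List Int) (k : Int) : Int :=
  ((PySem.List.enumerate nums).foldl
    (fun (st : Int × Int × PySem.Dict Int Int) p =>
      (st.1 + p.2,
       if st.2.2.contains (st.1 + p.2 - k)
         then max st.2.1 (p.1 + 1 - st.2.2.getD (st.1 + p.2 - k) 0)
         else st.2.1,
       if st.2.2.contains (st.1 + p.2) then st.2.2
         else st.2.2.insert (st.1 + p.2) (p.1 + 1)))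
    ((0 : Int), (0 : Int), PySem.Dict.empty.insert (0 : Int) (0 : Int))).2.1

-- ===== PRECONDITION & SPEC =====
def Spec_maxSubArrayLen_tle (nums : List Int) (k : Int) (out : Int) : Prop := out = maxSubArrayLen_tle_alt nums k
instance (nums : List Int) (k : Int) (out : Int) : Decidable (Spec_maxSubArrayLen_tle nums k out) := by unfold Spec_maxSubArrayLen_tle; infer_instance

-- ===== CLAIM (what is proved, stated in full; the proofs are below) =====
def Claim_equal_maxSubArrayLen_tle : Prop := ∀ (nums : List Int) (k : Int), Dom_maxSubArrayLen_tle nums k → Spec_maxSubArrayLen_tle nums k (maxSubArrayLen_tle nums k)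

-- ===== LEMMAS AND PROOFS =====

-- prefix sum of the first t elements
def pvP (nums : List Int) (t : Nat) : Int := (nums.take t).sum

-- first index t ≤ m with prefix sum v
def pvMinIdx (nums : List Int) (v : Int) (m : Nat) : Option Nat :=
  (List.range (m + 1)).find? (fun t => pvP nums t == v)

-- the value B's loop computes after m elements, end-by-end recursion
def pvBspec (nums : List Int) (k : Int) : Nat → Int
  | 0 => 0
  | m + 1 =>
    match pvMinIdx nums (pvP nums (m + 1) - k) m with
    | some t => max (pvBspec nums k m) ((m : Int) + 1 - (t : Int))
    | none => pvBspec nums k m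

-- candidate lengths grouped by start (A's order)
def pvValsStart (nums : List Int) (k : Int) (n : Nat) : List Int :=
  (List.range n).flatMap (fun i =>
    ((List.range' i (n - i)).filter (fun j => pvP nums (j + 1) - pvP nums i == k)).map
      (fun (j : Nat) => (j : Int) - (i : Int) + 1))

-- candidate lengths grouped by end (B's order)
def pvValsEnd (nums : List Int) (k : Int) (n : Nat) : List Int :=
  (List.range' 1 n).flatMap (fun j =>
    ((List.range j).filter (fun i => pvP nums j - pvP nums i == k)).map
      (fun (i : Nat) => (j : Int) - (i : Int)))

theorem pvP_succ (nums : List Int) (t : Nat) :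
    pvP nums (t + 1) = pvP nums t + nums.getD t 0 := by
  simp [pvP, List.take_add_one, List.getD_eq_getElem?_getD]
  cases nums[t]? <;> simp

theorem pv_foldl_max_le {l : List Int} {b c : Int} (hb : b ≤ c) (h : ∀ a ∈ l, a ≤ c) :
    l.foldl max b ≤ c := by
  induction l generalizing b with
  | nil => exact hb
  | cons x t ih =>
    exact ih (max_le hb (h x (by simp))) (fun a ha => h a (by simp [ha]))

theorem pv_le_foldl_max {l : List Int} (b : Int) : b ≤ l.foldl max b := by
  induction l generalizing b with
  | nil => simp
  | cons x t ih => exact le_trans (le_max_left b x) (ih (max b x))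

theorem pv_mem_le_foldl_max {l : List Int} {a : Int} :
    ∀ (b : Int), a ∈ l → a ≤ l.foldl max b := by
  induction l with
  | nil => intro b ha; simp at ha
  | cons x t ih =>
    intro b ha
    rcases List.mem_cons.1 ha with rfl | h
    · exact le_trans (le_max_right b a) (pv_le_foldl_max _)
    · exact ih _ h

theorem pv_foldl_max_congr {l₁ l₂ : List Int} (b : Int) (h : ∀ a, a ∈ l₁ ↔ a ∈ l₂) :
    l₁.foldl max b = l₂.foldl max b := by
  apply le_antisymm
  · exact pv_foldl_max_le (pv_le_foldl_max b)
      (fun a ha => pv_mem_le_foldl_max b ((h a).1 ha))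
  · exact pv_foldl_max_le (pv_le_foldl_max b)
      (fun a ha => pv_mem_le_foldl_max b ((h a).2 ha))

theorem pv_foldl_max_eq_of_mem {l : List Int} {c : Int} (b : Int) (hc : c ∈ l)
    (h : ∀ a ∈ l, a ≤ c) : l.foldl max b = max b c := by
  apply le_antisymm
  · exact pv_foldl_max_le (le_max_left _ _)
      (fun a ha => le_trans (h a ha) (le_max_right _ _))
  · exact max_le (pv_le_foldl_max b) (pv_mem_le_foldl_max b hc)

theorem pv_foldl_max_flatMap {α : Type} (l : List α) (g : α → List Int) (b : Int) :
    (l.flatMap g).foldl max b = l.foldl (fun acc i => (g i).foldl max acc) b := by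
  induction l generalizing b with
  | nil => simp
  | cons x t ih => simp [List.flatMap_cons, List.foldl_append, ih]

-- A's inner while-loop computes a running max over the valid ends for start i
theorem pv_innerA (nums : List Int) (k : Int) (i : Nat) :
    ∀ (cnt j0 : Nat) (L : Int),
      ((List.range' j0 cnt).foldl
        (fun (st : Int × Int) j =>
          (st.1 + nums.getD j 0,
           if st.1 + nums.getD j 0 = k then max st.2 ((j : Int) - (i : Int) + 1) else st.2))
        (pvP nums j0 - pvP nums i, L)).2
      = (((List.range' j0 cnt).filter (fun j => pvP nums (j + 1) - pvP nums i == k)).map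
          (fun (j : Nat) => (j : Int) - (i : Int) + 1)).foldl max L := by
  intro cnt
  induction cnt with
  | zero => intro j0 L; simp
  | succ m ih =>
    intro j0 L
    rw [List.range'_succ]
    simp only [List.foldl_cons, List.filter_cons]
    have hs : pvP nums j0 - pvP nums i + nums.getD j0 0 = pvP nums (j0 + 1) - pvP nums i := by
      rw [pvP_succ]; ring
    rw [hs]
    by_cases hk : pvP nums (j0 + 1) - pvP nums i = k
    · rw [if_pos hk]
      have hb : (pvP nums (j0 + 1) - pvP nums i == k) = true := by simpa using hk
      simp only [hb, if_true, List.map_cons, List.foldl_cons]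
      exact ih (j0 + 1) (max L ((j0 : Int) - (i : Int) + 1))
    · rw [if_neg hk]
      have hb : (pvP nums (j0 + 1) - pvP nums i == k) = false := by
        simp [hk]
      simp only [hb, Bool.false_eq_true, if_false]
      exact ih (j0 + 1) L

-- A's value is the max of the start-grouped candidate list
theorem pv_A_eq (nums : List Int) (k : Int) :
    maxSubArrayLen_tle nums k = (pvValsStart nums k nums.length).foldl max 0 := by
  rw [maxSubArrayLen_tle, pvValsStart, pv_foldl_max_flatMap]
  apply PySem.List.foldl_congr_mem
  intro L i _hi
  rw [show ((0 : Int), L) = (pvP nums i - pvP nums i, L) by ring_nf]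
  exact pv_innerA nums k i (nums.length - i) i L

theorem pvMinIdx_succ (nums : List Int) (v : Int) (m : Nat) :
    pvMinIdx nums v (m + 1)
      = (pvMinIdx nums v m).or (if pvP nums (m + 1) = v then some (m + 1) else none) := by
  unfold pvMinIdx
  rw [show m + 1 + 1 = (m + 1) + 1 from rfl, List.range_succ, List.find?_append]
  by_cases h : pvP nums (m + 1) = v <;> simp [h]

-- B's loop invariant: after m elements the state is (pvP m, pvBspec m, first-occurrence dict)
theorem pv_B_loop (nums : List Int) (k : Int) :
    ∀ (rest : List Int) (m : Nat) (d : PySem.Dict Int Int) (b : Int),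
      nums.drop m = rest →
      (∀ v, d.get? v = (pvMinIdx nums v m).map (fun t => (t : Int))) →
      b = pvBspec nums k m →
      ((PySem.List.enumerate rest (m : Int)).foldl
        (fun (st : Int × Int × PySem.Dict Int Int) p =>
          (st.1 + p.2,
           if st.2.2.contains (st.1 + p.2 - k)
             then max st.2.1 (p.1 + 1 - st.2.2.getD (st.1 + p.2 - k) 0)
             else st.2.1,
           if st.2.2.contains (st.1 + p.2) then st.2.2
             else st.2.2.insert (st.1 + p.2) (p.1 + 1)))
        (pvP nums m, b, d)).2.1
      = pvBspec nums k (m + rest.length) := by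
  intro rest
  induction rest with
  | nil =>
    intro m d b _ _ hb
    simp [PySem.List.enumerate_nil, hb]
  | cons x rest ih =>
    intro m d b hdrop hdict hb
    rw [PySem.List.enumerate_cons, List.foldl_cons]
    have hx : nums[m]? = some x := by
      have h0 : (nums.drop m)[0]? = some x := by rw [hdrop]; rfl
      simpa using h0
    have hgx : nums.getD m 0 = x := by simp [List.getD_eq_getElem?_getD, hx]
    have hs : pvP nums m + x = pvP nums (m + 1) := by rw [pvP_succ, hgx]
    have hdrop' : nums.drop (m + 1) = rest := by
      have : (nums.drop m).drop 1 = rest := by rw [hdrop]; rfl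
      simpa [List.drop_drop] using this
    have hcontains : ∀ v, d.contains v = (pvMinIdx nums v m).isSome := by
      intro v; rw [PySem.Dict.contains_eq_isSome_get?, hdict]; cases pvMinIdx nums v m <;> simp
    -- the new best is pvBspec (m+1)
    have hbest :
        (if d.contains (pvP nums m + x - k)
           then max b ((m : Int) + 1 - d.getD (pvP nums m + x - k) 0)
           else b) = pvBspec nums k (m + 1) := by
      rw [hs, hcontains]
      cases hmin : pvMinIdx nums (pvP nums (m + 1) - k) m with
      | none => simp [pvBspec, hmin, hb]
      | some t =>
        have hget : d.getD (pvP nums (m + 1) - k) 0 = (t : Int) := by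
          rw [PySem.Dict.getD_eq_get?_getD, hdict, hmin]; rfl
        simp [pvBspec, hmin, hb, hget]
    -- the new dict satisfies the invariant at m+1
    have hdict' : ∀ v,
        (if d.contains (pvP nums (m + 1)) then d
         else d.insert (pvP nums (m + 1)) ((m + 1 : Nat) : Int)).get? v
        = (pvMinIdx nums v (m + 1)).map (fun t => (t : Int)) := by
      intro v
      rw [hcontains, pvMinIdx_succ]
      cases hmin : pvMinIdx nums (pvP nums (m + 1)) m with
      | some t =>
        simp only [Option.isSome_some, if_true]
        by_cases hv : v = pvP nums (m + 1)
        · subst hv; rw [hdict, hmin, if_pos rfl]; simp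
        · rw [hdict]
          rw [if_neg (fun h => hv h.symm)]
          simp
      | none =>
        simp only [Option.isSome_none, Bool.false_eq_true, if_false]
        rw [PySem.Dict.get?_insert]
        by_cases hv : v = pvP nums (m + 1)
        · subst hv; rw [if_pos rfl, hmin, if_pos rfl]; simp
        · rw [if_neg hv, hdict, if_neg (fun h => hv h.symm)]
          simp
    rw [hbest]
    have hcast : (m : Int) + 1 = ((m + 1 : Nat) : Int) := by push_cast; ring
    rw [hs, hcast]
    rw [ih (m + 1) _ _ hdrop' hdict' rfl]
    congr 1
    simp
    omega

-- B's value is pvBspec at n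
theorem pv_B_eq (nums : List Int) (k : Int) :
    maxSubArrayLen_tle_alt nums k = pvBspec nums k nums.length := by
  rw [maxSubArrayLen_tle_alt]
  have hd : ∀ v, (PySem.Dict.empty.insert (0 : Int) (0 : Int)).get? v
      = (pvMinIdx nums v 0).map (fun t => (t : Int)) := by
    intro v
    rw [PySem.Dict.get?_insert]
    by_cases hv : v = 0
    · subst hv; simp [pvMinIdx, List.range_one, pvP]
    · rw [if_neg hv]
      have hm : pvMinIdx nums v 0 = none := by
        rw [pvMinIdx, List.find?_eq_none]
        intro x hx
        simp only [List.mem_range] at hx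
        have hx0 : x = 0 := by omega
        subst hx0
        simp only [pvP, List.take_zero, List.sum_nil, beq_iff_eq]
        exact fun h => absurd h.symm hv
      rw [hm]
      simp [PySem.Dict.get?_empty]
  have hmain := pv_B_loop nums k nums 0 (PySem.Dict.empty.insert (0 : Int) (0 : Int)) 0
    rfl hd rfl
  simpa using hmain

-- pvBspec is the max of the end-grouped candidate list
theorem pv_Bspec_eq (nums : List Int) (k : Int) :
    ∀ m, pvBspec nums k m = (pvValsEnd nums k m).foldl max 0 := by
  intro m
  induction m with
  | zero => simp [pvBspec, pvValsEnd]
  | succ m ih =>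
    rw [pvValsEnd, List.range'_concat, List.flatMap_append, List.foldl_append,
      ← pvValsEnd, ← ih]
    have harith : 1 + 1 * m = m + 1 := by omega
    rw [harith]
    simp only [List.flatMap_cons, List.flatMap_nil, List.append_nil]
    cases hmin : pvMinIdx nums (pvP nums (m + 1) - k) m with
    | none =>
      have hfil : (List.range (m + 1)).filter
          (fun i => pvP nums (m + 1) - pvP nums i == k) = [] := by
        rw [List.filter_eq_nil_iff]
        intro i hi
        have hni := (List.find?_eq_none.1 hmin) i hi
        simp only [beq_iff_eq] at hni ⊢
        intro h; exact hni (by linarith)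
      rw [hfil]
      simp [pvBspec, hmin]
    | some t =>
      obtain ⟨hpt, idx, hidx, hval, hmin'⟩ := List.find?_eq_some_iff_getElem.1 hmin
      simp only [List.getElem_range] at hval
      subst hval
      simp only [List.length_range] at hidx
      simp only [beq_iff_eq] at hpt
      have hmem : (((m + 1 : Nat) : Int) - (idx : Int)) ∈
          ((List.range (m + 1)).filter (fun i => pvP nums (m + 1) - pvP nums i == k)).map
            (fun (i : Nat) => ((m + 1 : Nat) : Int) - (i : Int)) := by
        refine List.mem_map.2 ⟨idx, ?_, rfl⟩
        rw [List.mem_filter]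
        exact ⟨List.mem_range.2 hidx, by simp only [beq_iff_eq]; linarith⟩
      have hbound : ∀ a ∈ ((List.range (m + 1)).filter
            (fun i => pvP nums (m + 1) - pvP nums i == k)).map
            (fun (i : Nat) => ((m + 1 : Nat) : Int) - (i : Int)),
          a ≤ ((m + 1 : Nat) : Int) - (idx : Int) := by
        intro a ha
        obtain ⟨i, hif, rfl⟩ := List.mem_map.1 ha
        rw [List.mem_filter] at hif
        obtain ⟨_, hiprop⟩ := hif
        simp only [beq_iff_eq] at hiprop
        have hile : idx ≤ i := by
          by_contra hlt
          have hlt2 : i < idx := by omega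
          have := hmin' i hlt2
          simp only [List.getElem_range, Bool.not_eq_eq_eq_not, Bool.not_true,
            beq_eq_false_iff_ne, ne_eq] at this
          exact this (by linarith)
        have : (idx : Int) ≤ (i : Int) := by exact_mod_cast hile
        linarith
      rw [pv_foldl_max_eq_of_mem _ hmem hbound]
      simp only [pvBspec, hmin]
      congr 1

-- the two candidate lists have the same members
theorem pv_vals_mem (nums : List Int) (k : Int) (a : Int) :
    a ∈ pvValsStart nums k nums.length ↔ a ∈ pvValsEnd nums k nums.length := by
  simp only [pvValsStart, pvValsEnd, List.mem_flatMap, List.mem_map, List.mem_filter,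
    List.mem_range, List.mem_range'_1, beq_iff_eq]
  constructor
  · rintro ⟨i, hi, j, ⟨⟨hij, hjn⟩, hkk⟩, rfl⟩
    refine ⟨j + 1, ⟨by omega, by omega⟩, i, ⟨by omega, ?_⟩, ?_⟩
    · exact hkk
    · push_cast; ring
  · rintro ⟨j, ⟨hj1, hjn⟩, i, ⟨hij, hkk⟩, rfl⟩
    obtain ⟨j', rfl⟩ : ∃ j', j = j' + 1 := ⟨j - 1, by omega⟩
    refine ⟨i, by omega, j', ⟨⟨by omega, by omega⟩, hkk⟩, ?_⟩
    push_cast; ring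

-- ===== VERDICT (by name: the statement is the Claim_ definition above) =====
theorem maxSubArrayLen_tle_spec : Claim_equal_maxSubArrayLen_tle := by
  intro nums k _
  unfold Spec_maxSubArrayLen_tle
  rw [pv_A_eq, pv_B_eq, pv_Bspec_eq]
  exact pv_foldl_max_congr 0 (pv_vals_mem nums k)
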